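-- pv_equiv track=rewrite | github.com/hippie-cycling/CBFT | Gromark_nokey_noioc.py | create_keyed_alphabet
-- ===== SOURCE A (Python) =====
-- def create_keyed_alphabet(keyword):
--     """Create a keyed alphabet from a keyword following Gromark cipher rules"""
--     # Remove duplicates while preserving order
--     seen = set()
--     keyword_unique = ''.join(c for c in keyword.upper() if not (c in seen or seen.add(c)))
--
--     # Add remaining alphabet letters
--     remaining = ''.join(c for c in 'ABCDEFGHIJKLMNOPQRSTUVWXYZ' if c not in keyword_unique)
--     keyed_base = keyword_unique + remaining
--
--     # Create transposition block
--     cols = len(keyword)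
--     rows = (len(keyed_base) + cols - 1) // cols
--     block = [['' for _ in range(cols)] for _ in range(rows)]
--
--     # Fill the block row by row
--     idx = 0
--     for i in range(rows):
--         for j in range(cols):
--             if idx < len(keyed_base):
--                 block[i][j] = keyed_base[idx]
--                 idx += 1
--
--     # Get column order based on keyword
--     # Convert keyword to numbers representing alphabetical order
--     order = []
--     sorted_chars = sorted(keyword)
--     for char in keyword:
--         order.append(sorted_chars.index(char) + 1)
--         # Handle repeated letters
--         sorted_chars[sorted_chars.index(char)] = None
--
--     # Create pairs of (order number, column index)
--     pairs = list(enumerate(order))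
--     # Sort by order number
--     pairs.sort(key=lambda x: x[1])
--     col_order = [p[0] for p in pairs]
--
--     # Create mixed alphabet by reading down columns in the determined order
--     mixed_alphabet = ''
--     for col in col_order:
--         for row in range(rows):
--             if row < len(block) and block[row][col]:
--                 mixed_alphabet += block[row][col]
--
--     return mixed_alphabet
-- ===== SOURCE B (Python) =====
-- def create_keyed_alphabet(keyword):
--     """Create a keyed alphabet from a keyword following Gromark cipher rules.
--     Same keyed base and column order as the original, but the transposition
--     block is never built: each column is read directly as a strided slice."""
--     keyword_unique = ''.join(dict.fromkeys(keyword.upper()))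
--     remaining = ''.join(c for c in 'ABCDEFGHIJKLMNOPQRSTUVWXYZ' if c not in keyword_unique)
--     keyed_base = keyword_unique + remaining
--
--     cols = len(keyword)
--
--     # Alphabetical ranks of the keyword letters (repeats numbered left to right)
--     order = []
--     sorted_chars = sorted(keyword)
--     for char in keyword:
--         order.append(sorted_chars.index(char) + 1)
--         sorted_chars[sorted_chars.index(char)] = None
--     pairs = list(enumerate(order))
--     pairs.sort(key=lambda x: x[1])
--     col_order = [p[0] for p in pairs]
--
--     # Read each column straight out of keyed_base as a strided slice
--     return ''.join(keyed_base[col::cols] for col in col_order)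
-- ===== Notes on version B (the rewrite author's own statement) =====
-- stated objective: simpler
-- what changed: B drops A's 2D transposition block entirely (no grid allocation, row-by-row fill loop, or column-by-column read loop): each column of the keyed base is read directly as a strided slice keyed_base[col::cols], and the keyword dedup uses dict.fromkeys instead of a seen-set generator; the keyed base and keyword-rank column order are computed as in A.
import Mathlib
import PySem

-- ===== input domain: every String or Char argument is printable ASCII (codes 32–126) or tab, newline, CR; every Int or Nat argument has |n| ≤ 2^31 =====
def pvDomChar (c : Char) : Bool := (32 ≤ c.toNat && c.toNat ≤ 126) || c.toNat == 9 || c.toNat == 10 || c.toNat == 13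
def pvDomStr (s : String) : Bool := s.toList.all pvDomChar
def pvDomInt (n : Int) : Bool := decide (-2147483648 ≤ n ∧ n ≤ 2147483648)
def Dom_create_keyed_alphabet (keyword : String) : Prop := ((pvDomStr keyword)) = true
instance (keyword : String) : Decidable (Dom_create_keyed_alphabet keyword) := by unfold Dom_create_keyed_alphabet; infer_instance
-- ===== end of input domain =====

-- B removes A's 2D transposition block: each column of the keyed base is read directly as a
-- strided slice (keyed_base[col::cols]) in keyword-rank order; return value only, no mutation.

-- ===== PORT A =====
-- 'ABCDEFGHIJKLMNOPQRSTUVWXYZ'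
def pvAlphabet : List Char := "ABCDEFGHIJKLMNOPQRSTUVWXYZ".toList

-- A: ''.join(c for c in keyword.upper() if not (c in seen or seen.add(c))) with seen = set()
def pvDedupA (l : List Char) : PySem.Set Char × List Char :=
  l.foldl (fun st c =>
      if PySem.Set.contains st.1 c then st else (PySem.Set.add st.1 c, st.2 ++ [c]))
    (PySem.Set.empty, [])

-- A: the 'order' loop (sorted_chars.index(char) + 1, then sorted_chars[index] = None)
def pvOrderLoopA (kw : List Char) : List Int × List (Option Char) :=
  kw.foldl (fun st c =>
      match PySem.List.index? st.2 (some c) with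
      | some i => (st.1 ++ [(i : Int) + 1], PySem.List.pySetD st.2 (i : Int) none)
      | none => st)   -- unreachable branch: char always occurs in sorted_chars (Python .index never raises here)
    ([], (PySem.List.sorted kw (fun x => x) false).map some)

-- A: pairs = enumerate(order); pairs.sort(key=x[1]); col_order = [p[0] for p in pairs]
def pvColOrderA (kw : List Char) : List Int :=
  (PySem.List.sorted (PySem.List.enumerate (pvOrderLoopA kw).1 0) (fun p => p.2) false).map (fun p => p.1)

def create_keyed_alphabet (keyword : String) : String :=
  let kw := keyword.toList
  let keyword_unique := (pvDedupA (PySem.Chars.upper kw)).2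
  let remaining := pvAlphabet.filter (fun c => !(keyword_unique.contains c))
  let keyed_base := keyword_unique ++ remaining
  let cols : Int := PySem.List.len kw
  let rows : Int := PySem.Int.floordiv (PySem.List.len keyed_base + cols - 1) cols
  let block0 : List (List (List Char)) :=
    (PySem.List.pyRange 0 rows 1).map (fun _ => (PySem.List.pyRange 0 cols 1).map (fun _ => ([] : List Char)))
  let fill :=
    (PySem.List.pyRange 0 rows 1).foldl (fun st i =>
      (PySem.List.pyRange 0 cols 1).foldl (fun st j =>
        if st.2 < PySem.List.len keyed_base then
          (PySem.List.pySetD st.1 i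
             (PySem.List.pySetD (PySem.List.pyGetD st.1 i []) j [PySem.List.pyGetD keyed_base st.2 ' ']),
           st.2 + 1)
        else st) st) (block0, (0 : Int))
  let block := fill.1
  let col_order := pvColOrderA kw
  let mixed := col_order.foldl (fun acc col =>
      (PySem.List.pyRange 0 rows 1).foldl (fun acc row =>
        if row < PySem.List.len block ∧ PySem.List.pyGetD (PySem.List.pyGetD block row []) col [] ≠ [] then
          acc ++ PySem.List.pyGetD (PySem.List.pyGetD block row []) col []
        else acc) acc) []
  String.ofList mixed

-- ===== PORT B =====
-- B: ''.join(dict.fromkeys(keyword.upper()))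
-- B: the same rank-and-sort column order as A computes it (Source B keeps that part)
def pvOrderLoopB (kw : List Char) : List Int × List (Option Char) :=
  kw.foldl (fun st c =>
      match PySem.List.index? st.2 (some c) with
      | some i => (st.1 ++ [(i : Int) + 1], PySem.List.pySetD st.2 (i : Int) none)
      | none => st)
    ([], (PySem.List.sorted kw (fun x => x) false).map some)

def pvColOrderB (kw : List Char) : List Int :=
  (PySem.List.sorted (PySem.List.enumerate (pvOrderLoopB kw).1 0) (fun p => p.2) false).map (fun p => p.1)

def create_keyed_alphabet_alt (keyword : String) : String :=
  let kw := keyword.toList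
  let keyword_unique := PySem.List.dedup (PySem.Chars.upper kw)
  let remaining := pvAlphabet.filter (fun c => !(keyword_unique.contains c))
  let keyed_base := keyword_unique ++ remaining
  let cols : Int := PySem.List.len kw
  let col_order := pvColOrderB kw
  String.ofList ((col_order.map (fun col =>
      (PySem.List.slice? keyed_base (some col) none cols).getD [])).flatten)

-- ===== PRECONDITION & SPEC =====
-- Pre_ excludes only the empty keyword, on which A raises ZeroDivisionError (cols = 0).
def Pre_create_keyed_alphabet (keyword : String) : Prop := keyword ≠ ""
instance (keyword : String) : Decidable (Pre_create_keyed_alphabet keyword) := by unfold Pre_create_keyed_alphabet; infer_instance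
def pvWitness_create_keyed_alphabet : String := "KEY"

def Spec_create_keyed_alphabet (keyword : String) (out : String) : Prop := out = create_keyed_alphabet_alt keyword
instance (keyword : String) (out : String) : Decidable (Spec_create_keyed_alphabet keyword out) := by unfold Spec_create_keyed_alphabet; infer_instance

-- ===== CLAIM (what is proved, stated in full; the proofs are below) =====
def Claim_equal_create_keyed_alphabet : Prop := ∀ (keyword : String), Dom_create_keyed_alphabet keyword → Pre_create_keyed_alphabet keyword → Spec_create_keyed_alphabet keyword (create_keyed_alphabet keyword)



-- ===== LEMMAS AND PROOFS =====

theorem pvDedupA_aux (l : List Char) : ∀ (s : PySem.Set Char),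
    l.foldl (fun st c =>
      if PySem.Set.contains st.1 c then st else (PySem.Set.add st.1 c, st.2 ++ [c])) (s, s)
    = (PySem.Set.update s l, PySem.Set.update s l) := by
  induction l with
  | nil => intro s; simp [PySem.Set.update]
  | cons c t ih =>
    intro s
    rw [List.foldl_cons, PySem.Set.update_cons]
    by_cases h : c ∈ s
    · rw [if_pos (by exact (PySem.Set.contains_iff s c).2 h), PySem.Set.add_of_mem h]
      exact ih s
    · rw [if_neg (by simp [h]), PySem.Set.add_of_not_mem h]
      exact ih (s ++ [c])

theorem pvDedupA_snd (l : List Char) : (pvDedupA l).2 = PySem.List.dedup l := by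
  show (l.foldl (fun st c =>
      if PySem.Set.contains st.1 c then st else (PySem.Set.add st.1 c, st.2 ++ [c]))
      (([] : PySem.Set Char), ([] : List Char))).2 = PySem.List.dedup l
  rw [show (([] : PySem.Set Char), ([] : List Char)) = ((([] : PySem.Set Char)), (([] : PySem.Set Char))) from rfl]
  rw [pvDedupA_aux l []]
  rw [PySem.Set.update_nil_left, PySem.List.dedup_eq_ofList]

theorem pvOrderLoop_len_aux (l : List Char) : ∀ (st : List Int × List (Option Char)),
    ((l.foldl (fun st c =>
      match PySem.List.index? st.2 (some c) with
      | some i => (st.1 ++ [(i : Int) + 1], PySem.List.pySetD st.2 (i : Int) none)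
      | none => st) st).1).length ≤ st.1.length + l.length := by
  induction l with
  | nil => intro st; simp
  | cons c t ih =>
    intro st
    rw [List.foldl_cons]
    cases h : PySem.List.index? st.2 (some c) with
    | some i =>
      calc _ ≤ (st.1 ++ [(i : Int) + 1]).length + t.length := ih _
        _ ≤ st.1.length + (c :: t).length := by simp; omega
    | none =>
      calc _ ≤ st.1.length + t.length := ih st
        _ ≤ st.1.length + (c :: t).length := by simp

theorem pvColOrderA_mem (kw : List Char) :
    ∀ col ∈ pvColOrderA kw, 0 ≤ col ∧ col < (kw.length : Int) := by
  intro col hcol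
  simp only [pvColOrderA, List.mem_map] at hcol
  obtain ⟨p, hp, rfl⟩ := hcol
  rw [PySem.List.mem_sorted] at hp
  rw [PySem.List.mem_enumerate_iff] at hp
  obtain ⟨k, hk, rfl⟩ := hp
  have hlen : (pvOrderLoopA kw).1.length ≤ kw.length := by
    have := pvOrderLoop_len_aux kw ([], (PySem.List.sorted kw (fun x => x) false).map some)
    simpa [pvOrderLoopA] using this
  constructor
  · simp
  · simp only [zero_add]
    exact_mod_cast by omega

def pvEntry (kb : List Char) (ccols i j : Nat) : List Char := (kb[i*ccols+j]?).toList

def pvRowPart (kb : List Char) (ccols i j : Nat) : List (List Char) :=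
  (List.range ccols).map (fun j' => if j' < j then pvEntry kb ccols i j' else [])

def pvBlkInv (kb : List Char) (ccols R i j : Nat) : List (List (List Char)) :=
  (List.range R).map (fun k =>
    if k < i then pvRowPart kb ccols k ccols
    else if k = i then pvRowPart kb ccols i j
    else pvRowPart kb ccols k 0)

def pvIdxInv (kb : List Char) (ccols i j : Nat) : Int := ((min (i*ccols+j) kb.length : Nat) : Int)

theorem set_map_range {β : Type} (f : Nat → β) (R i : Nat) (v : β) :
    ((List.range R).map f).set i v = (List.range R).map (fun k => if k = i then v else f k) := by
  apply List.ext_getElem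
  · simp
  · intro k h1 h2
    rw [List.getElem_set]
    simp only [List.getElem_map, List.getElem_range]
    by_cases hk : k = i
    · rw [if_pos hk.symm, if_pos hk]
    · rw [if_neg (fun h => hk h.symm), if_neg hk]

theorem fill_step (kb : List Char) (ccols R i j : Nat) (hi : i < R) (hj : j < ccols) :
    (if pvIdxInv kb ccols i j < PySem.List.len kb then
       (PySem.List.pySetD (pvBlkInv kb ccols R i j) (i : Int)
          (PySem.List.pySetD (PySem.List.pyGetD (pvBlkInv kb ccols R i j) (i : Int) []) (j : Int)
            [PySem.List.pyGetD kb (pvIdxInv kb ccols i j) ' ']),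
        pvIdxInv kb ccols i j + 1)
     else (pvBlkInv kb ccols R i j, pvIdxInv kb ccols i j))
    = (pvBlkInv kb ccols R i (j+1), pvIdxInv kb ccols i (j+1)) := by
  have hget : PySem.List.pyGetD (pvBlkInv kb ccols R i j) (i : Int) [] = pvRowPart kb ccols i j := by
    rw [PySem.List.pyGetD_natCast]
    unfold pvBlkInv
    rw [PySem.List.getD_map_range _ _ _ _ hi]
    simp
  by_cases h : i*ccols+j < kb.length
  · rw [if_pos (by simp only [pvIdxInv, PySem.List.len_eq]; exact_mod_cast by omega)]
    have hidx : pvIdxInv kb ccols i j = ((i*ccols+j : Nat) : Int) := by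
      simp only [pvIdxInv]; congr 1; omega
    have hchar : PySem.List.pyGetD kb (pvIdxInv kb ccols i j) ' ' = kb[i*ccols+j] := by
      rw [hidx, PySem.List.pyGetD_natCast]
      exact List.getD_eq_getElem _ _ h
    have hentry : [kb[i*ccols+j]] = pvEntry kb ccols i j := by
      simp [pvEntry, List.getElem?_eq_getElem h]
    rw [Prod.mk.injEq]
    refine ⟨?_, ?_⟩
    · rw [hget, hchar, hentry, PySem.List.pySetD_natCast, PySem.List.pySetD_natCast]
      unfold pvRowPart
      rw [set_map_range _ _ _ _]
      unfold pvBlkInv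
      rw [set_map_range _ _ _ _]
      apply List.map_congr_left
      intro k hk
      by_cases hki : k = i
      · subst hki
        rw [if_pos rfl, if_neg (lt_irrefl _), if_pos rfl]
        unfold pvRowPart
        apply List.map_congr_left
        intro j' hj'
        by_cases h3 : j' = j
        · subst h3
          rw [if_pos rfl, if_pos (by omega)]
        · rw [if_neg h3]
          by_cases h4 : j' < j
          · rw [if_pos h4, if_pos (by omega)]
          · rw [if_neg h4, if_neg (by omega)]
      · rw [if_neg hki]
        by_cases h1 : k < i
        · rw [if_pos h1, if_pos h1]
        · rw [if_neg h1, if_neg h1, if_neg hki, if_neg hki]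
    · rw [hidx]
      simp only [pvIdxInv]
      exact_mod_cast by omega
  · rw [if_neg (by simp only [pvIdxInv, PySem.List.len_eq]; exact_mod_cast by omega)]
    rw [Prod.mk.injEq]
    refine ⟨?_, ?_⟩
    · unfold pvBlkInv
      apply List.map_congr_left
      intro k hk
      by_cases h1 : k < i
      · rw [if_pos h1, if_pos h1]
      · by_cases hki : k = i
        · subst hki
          rw [if_neg h1, if_neg h1, if_pos rfl, if_pos rfl]
          unfold pvRowPart
          apply List.map_congr_left
          intro j' hj'
          by_cases h4 : j' < j
          · rw [if_pos h4, if_pos (by omega)]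
          · rw [if_neg h4]
            by_cases h5 : j' < j + 1
            · have hjj : j' = j := by omega
              subst hjj
              rw [if_pos h5]
              simp only [pvEntry]
              rw [List.getElem?_eq_none (by omega)]
              rfl
            · rw [if_neg h5]
        · rw [if_neg h1, if_neg h1, if_neg hki, if_neg hki]
    · simp only [pvIdxInv]
      congr 1
      omega

def pvBlockSpec (kb : List Char) (ccols R : Nat) : List (List (List Char)) :=
  (List.range R).map (fun k => pvRowPart kb ccols k ccols)

theorem pvRowPart_zero (kb : List Char) (ccols x y : Nat) :
    pvRowPart kb ccols x 0 = pvRowPart kb ccols y 0 := by simp [pvRowPart]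

theorem blkInv_next (kb : List Char) (ccols R i : Nat) :
    pvBlkInv kb ccols R i ccols = pvBlkInv kb ccols R (i+1) 0 := by
  unfold pvBlkInv
  apply List.map_congr_left
  intro k hk
  by_cases h1 : k < i
  · rw [if_pos h1, if_pos (by omega)]
  · by_cases h2 : k = i
    · subst h2
      rw [if_neg h1, if_pos rfl, if_pos (by omega)]
    · rw [if_neg h1, if_neg h2, if_neg (by omega)]
      by_cases h3 : k = i + 1
      · rw [if_pos h3]
        exact pvRowPart_zero kb ccols k (i+1)
      · rw [if_neg h3]

theorem idxInv_next (kb : List Char) (ccols i : Nat) :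
    pvIdxInv kb ccols i ccols = pvIdxInv kb ccols (i+1) 0 := by
  simp [pvIdxInv, Nat.succ_mul]

theorem fill_inner (kb : List Char) (ccols R i : Nat) (hi : i < R) :
    ∀ t j, j + t = ccols →
    (List.range' j t).foldl (fun st (jj : Nat) =>
        if st.2 < PySem.List.len kb then
          (PySem.List.pySetD st.1 (i : Int)
             (PySem.List.pySetD (PySem.List.pyGetD st.1 (i : Int) []) (jj : Int)
               [PySem.List.pyGetD kb st.2 ' ']),
           st.2 + 1)
        else st)
      (pvBlkInv kb ccols R i j, pvIdxInv kb ccols i j)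
    = (pvBlkInv kb ccols R i ccols, pvIdxInv kb ccols i ccols) := by
  intro t
  induction t with
  | zero => intro j hj; subst hj; simp
  | succ t ih =>
    intro j hj
    rw [List.range'_succ, List.foldl_cons]
    have hstep := fill_step kb ccols R i j hi (by omega)
    simp only at hstep ⊢
    rw [hstep]
    exact ih (j+1) (by omega)

theorem fill_outer (kb : List Char) (ccols R : Nat) :
    ∀ t i, i + t = R →
    (List.range' i t).foldl (fun st (ii : Nat) =>
        (List.range' 0 ccols).foldl (fun st (jj : Nat) =>
          if st.2 < PySem.List.len kb then
            (PySem.List.pySetD st.1 (ii : Int)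
               (PySem.List.pySetD (PySem.List.pyGetD st.1 (ii : Int) []) (jj : Int)
                 [PySem.List.pyGetD kb st.2 ' ']),
             st.2 + 1)
          else st) st)
      (pvBlkInv kb ccols R i 0, pvIdxInv kb ccols i 0)
    = (pvBlkInv kb ccols R R 0, pvIdxInv kb ccols R 0) := by
  intro t
  induction t with
  | zero => intro i hi; subst hi; simp
  | succ t ih =>
    intro i hi
    rw [List.range'_succ, List.foldl_cons]
    have hin := fill_inner kb ccols R i (by omega) ccols 0 (by omega)
    simp only at hin ⊢
    rw [hin, blkInv_next, idxInv_next]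
    exact ih (i+1) (by omega)

theorem blkInv_final (kb : List Char) (ccols R : Nat) :
    pvBlkInv kb ccols R R 0 = pvBlockSpec kb ccols R := by
  unfold pvBlkInv pvBlockSpec
  apply List.map_congr_left
  intro k hk
  rw [if_pos (List.mem_range.1 hk)]

theorem fill_result (kb : List Char) (ccols R : Nat) :
    ((PySem.List.pyRange 0 (R : Int) 1).foldl (fun st i =>
        (PySem.List.pyRange 0 (ccols : Int) 1).foldl (fun st j =>
          if st.2 < PySem.List.len kb then
            (PySem.List.pySetD st.1 i
               (PySem.List.pySetD (PySem.List.pyGetD st.1 i []) j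
                 [PySem.List.pyGetD kb st.2 ' ']),
             st.2 + 1)
          else st) st)
      ((PySem.List.pyRange 0 (R : Int) 1).map (fun _ => (PySem.List.pyRange 0 (ccols : Int) 1).map (fun _ => ([] : List Char))), (0 : Int))).1
    = pvBlockSpec kb ccols R := by
  have hinit : ((PySem.List.pyRange 0 (R : Int) 1).map (fun _ => (PySem.List.pyRange 0 (ccols : Int) 1).map (fun _ => ([] : List Char))) : List (List (List Char)))
      = pvBlkInv kb ccols R 0 0 := by
    rw [PySem.List.pyRange_zero_nat, PySem.List.pyRange_zero_nat, List.map_map]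
    unfold pvBlkInv
    apply List.map_congr_left
    intro k hk
    by_cases h2 : k = 0
    · subst h2
      rw [if_neg (by omega), if_pos rfl]
      refine List.ext_getElem (by simp [pvRowPart]) ?_
      intro idx h1 hh2
      simp [pvRowPart]
    · rw [if_neg (by omega), if_neg h2]
      refine List.ext_getElem (by simp [pvRowPart]) ?_
      intro idx h1 hh2
      simp [pvRowPart]
  rw [hinit]
  simp only [PySem.List.pyRange_zero_nat, List.foldl_map, List.range_eq_range']
  have h0 : (0 : Int) = pvIdxInv kb ccols 0 0 := by simp [pvIdxInv]
  rw [h0]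
  have hout := fill_outer kb ccols R R 0 (by omega)
  simp only at hout ⊢
  rw [hout, blkInv_final]

def pvColA (kb : List Char) (ccols R c : Nat) : List Char :=
  (List.range R).flatMap (fun r => (kb[r*ccols+c]?).toList)

theorem read_col (kb : List Char) (ccols R : Nat) (col : Int) (acc : List Char)
    (h0 : 0 ≤ col) (h1 : col < (ccols : Int)) :
    (PySem.List.pyRange 0 (R : Int) 1).foldl (fun acc row =>
        if row < PySem.List.len (pvBlockSpec kb ccols R) ∧
           PySem.List.pyGetD (PySem.List.pyGetD (pvBlockSpec kb ccols R) row []) col [] ≠ [] then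
          acc ++ PySem.List.pyGetD (PySem.List.pyGetD (pvBlockSpec kb ccols R) row []) col []
        else acc) acc
    = acc ++ pvColA kb ccols R col.toNat := by
  rw [PySem.List.pyRange_zero_nat, List.foldl_map]
  have hbody : ∀ (a : List Char), ∀ r ∈ List.range R,
      (if ((r:Int)) < PySem.List.len (pvBlockSpec kb ccols R) ∧
           PySem.List.pyGetD (PySem.List.pyGetD (pvBlockSpec kb ccols R) (r:Int) []) col [] ≠ [] then
          a ++ PySem.List.pyGetD (PySem.List.pyGetD (pvBlockSpec kb ccols R) (r:Int) []) col []
        else a)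
      = a ++ (kb[r*ccols+col.toNat]?).toList := by
    intro a r hr
    have hrR : r < R := List.mem_range.1 hr
    have hrow : PySem.List.pyGetD (pvBlockSpec kb ccols R) (r:Int) [] = pvRowPart kb ccols r ccols := by
      rw [PySem.List.pyGetD_natCast]
      unfold pvBlockSpec
      exact PySem.List.getD_map_range _ _ _ _ hrR
    have hent : PySem.List.pyGetD (pvRowPart kb ccols r ccols) col [] = (kb[r*ccols+col.toNat]?).toList := by
      rw [PySem.List.pyGetD_eq_getElem _ _ h0 (by simp [pvRowPart]; omega)]
      unfold pvRowPart
      rw [List.getElem_map, List.getElem_range]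
      rw [if_pos (by have := List.length_range (n := ccols); omega)]
      rfl
    rw [hrow, hent]
    have hlen : PySem.List.len (pvBlockSpec kb ccols R) = (R : Int) := by
      simp [pvBlockSpec, PySem.List.len_eq]
    rw [hlen]
    by_cases he : (kb[r*ccols+col.toNat]?).toList = []
    · rw [if_neg (by simp [he]), he, List.append_nil]
    · rw [if_pos ⟨by exact_mod_cast hrR, he⟩]
  rw [PySem.List.foldl_congr_mem _ _ _ _ hbody]
  exact PySem.List.foldl_append_eq_flatMap _ _ _

theorem flatMap_toList_eq_filterMap {α : Type} (f : Nat → Option α) (l : List Nat) :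
    l.flatMap (fun r => (f r).toList) = l.filterMap f := by
  induction l with
  | nil => rfl
  | cons x t ih =>
    rw [List.flatMap_cons, List.filterMap_cons, ih]
    cases f x <;> simp

theorem filterMap_range_shrink {α : Type} (f : Nat → Option α) (C R : Nat)
    (hCR : C ≤ R) (hnone : ∀ k, C ≤ k → f k = none) :
    (List.range R).filterMap f = (List.range C).filterMap f := by
  have : R = C + (R - C) := by omega
  rw [this, List.range_add, List.filterMap_append]
  have h2 : ((List.range (R - C)).map (fun x => C + x)).filterMap f = [] := by
    rw [List.filterMap_eq_nil_iff]
    intro a ha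
    simp only [List.mem_map, List.mem_range] at ha
    obtain ⟨x, hx, rfl⟩ := ha
    exact hnone _ (by omega)
  rw [h2, List.append_nil]

-- stride: keyed_base[col::cols]
theorem stride_col (kb : List Char) (ccols : Nat) (col : Int) (hc : 0 < ccols) (h0 : 0 ≤ col) (h1 : col < (ccols:Int)) :
    (PySem.List.slice? kb (some col) none (ccols : Int)).getD []
    = (List.range ((kb.length + ccols - 1)/ccols)).filterMap (fun r => kb[r*ccols+col.toNat]?) := by
  simp only [PySem.List.slice?, PySem.List.sliceIndices]
  rw [if_neg (by exact_mod_cast by omega)]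
  rw [Option.getD_some]
  have hc0 : ¬ ((ccols:Int) < 0) := by exact_mod_cast by omega
  have hc1 : (0:Int) < (ccols:Int) := by exact_mod_cast hc
  have hcol : ¬ col < 0 := by omega
  simp only [if_neg hc0, if_pos hc1, if_neg hcol]
  obtain ⟨c, rfl⟩ : ∃ c : Nat, col = (c : Int) := ⟨col.toNat, (Int.toNat_of_nonneg h0).symm⟩
  rw [Int.toNat_natCast]
  by_cases hcn : c < kb.length
  · rw [min_eq_left (by exact_mod_cast by omega)]
    rw [if_pos (by exact_mod_cast hcn)]
    have hcount : ((((kb.length : Int)) - (c:Int) + (ccols:Int) - 1) / (ccols:Int)).toNat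
        = (kb.length - c + ccols - 1)/ccols := by
      rw [show ((kb.length : Int)) - (c:Int) + (ccols:Int) - 1 = ((kb.length - c + ccols - 1 : Nat) : Int) by omega]
      rw [← Int.natCast_div, Int.toNat_natCast]
    rw [hcount]
    have hidx : ∀ x : Nat, ((c:Int) + (ccols:Int)*(x:Int)).toNat = x*ccols + c := by
      intro x
      rw [show ((c:Int) + (ccols:Int)*(x:Int)) = ((x*ccols + c : Nat) : Int) by push_cast; ring, Int.toNat_natCast]
    simp only [hidx]
    set C := (kb.length - c + ccols - 1)/ccols with hC
    set R := (kb.length + ccols - 1)/ccols with hR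
    have hCR : C ≤ R := Nat.div_le_div_right (by omega)
    refine (filterMap_range_shrink _ C R hCR ?_).symm
    intro k hk
    have hdm := Nat.div_add_mod (kb.length - c + ccols - 1) ccols
    have hm : (kb.length - c + ccols - 1) % ccols < ccols := Nat.mod_lt _ hc
    have h5 : kb.length - c ≤ ccols * C := by rw [hC]; omega
    have h6 : ccols * C ≤ ccols * k := Nat.mul_le_mul_left _ hk
    have h7 : k * ccols = ccols * k := Nat.mul_comm _ _
    exact List.getElem?_eq_none (by omega)
  · rw [min_eq_right (by exact_mod_cast by omega)]
    rw [if_neg (lt_irrefl _)]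
    rw [List.range_zero, List.filterMap_nil]
    symm
    rw [List.filterMap_eq_nil_iff]
    intro r hr
    exact List.getElem?_eq_none (by omega)


-- ===== VERDICT (by name: the statement is the Claim_ definition above) =====
theorem create_keyed_alphabet_spec : Claim_equal_create_keyed_alphabet := by
  unfold Claim_equal_create_keyed_alphabet
  intro keyword _hdom hpre
  unfold Spec_create_keyed_alphabet
  unfold create_keyed_alphabet create_keyed_alphabet_alt
  simp only [pvDedupA_snd]
  set kw := keyword.toList with hkw
  have hkwne : kw ≠ [] := by
    intro h
    apply hpre
    have : keyword = String.ofList kw := by rw [hkw, keyword.ofList_toList]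
    rw [this, h]
  set ku := PySem.List.dedup (PySem.Chars.upper kw) with hku
  set kb := ku ++ pvAlphabet.filter (fun c => !(ku.contains c)) with hkb
  set ccols := kw.length with hcc
  have hc : 0 < ccols := List.length_pos_iff.mpr hkwne
  have hcols : PySem.List.len kw = (ccols : Int) := by rw [PySem.List.len_eq]
  rw [hcols]
  set n := kb.length with hn
  set R := (n + ccols - 1)/ccols with hR
  have hrows : PySem.Int.floordiv (PySem.List.len kb + (ccols:Int) - 1) (ccols:Int) = (R:Int) := by
    rw [PySem.List.len_eq, ← hn,
        show ((n:Int) + (ccols:Int) - 1) = ((n + ccols - 1 : Nat) : Int) by omega,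
        PySem.Int.floordiv_natCast, hR]
  rw [hrows]
  rw [fill_result kb ccols R]
  rw [String.ofList_inj]
  have hco : pvColOrderA kw = pvColOrderB kw := rfl
  rw [hco]
  -- A side: each inner read fold appends one column
  have hbody : ∀ (acc : List Char), ∀ col ∈ pvColOrderB kw,
      ((PySem.List.pyRange 0 (R : Int) 1).foldl (fun acc row =>
        if row < PySem.List.len (pvBlockSpec kb ccols R) ∧
           PySem.List.pyGetD (PySem.List.pyGetD (pvBlockSpec kb ccols R) row []) col [] ≠ [] then
          acc ++ PySem.List.pyGetD (PySem.List.pyGetD (pvBlockSpec kb ccols R) row []) col []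
        else acc) acc)
      = acc ++ pvColA kb ccols R col.toNat := by
    intro acc col hcol
    have hb := pvColOrderA_mem kw col (by rw [hco]; exact hcol)
    exact read_col kb ccols R col acc hb.1 hb.2
  rw [PySem.List.foldl_congr_mem _ _ _ _ hbody]
  rw [PySem.List.foldl_append_eq_flatMap]
  rw [List.nil_append]
  -- B side: each slice is one column
  have hmap : (pvColOrderB kw).map (fun col => (PySem.List.slice? kb (some col) none (ccols:Int)).getD [])
      = (pvColOrderB kw).map (fun col => pvColA kb ccols R col.toNat) := by
    apply List.map_congr_left
    intro col hcol
    have hb := pvColOrderA_mem kw col (by rw [hco]; exact hcol)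
    rw [stride_col kb ccols col hc hb.1 hb.2]
    rw [pvColA, flatMap_toList_eq_filterMap, ← hn, hR]
  rw [hmap]
  rw [List.flatMap_def]
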